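-- pv_equiv track=rewrite | github.com/rbrasga/sppd_replay_public | HELPER_DB.py | getHighestPairedCard
-- ===== SOURCE A (Python) =====
-- def getHighestPairedCard(card_name,set_of_decks):
-- 	META_DECK_LEN=12
-- 	filter_list=[]
-- 	filter_list.append(card_name)
-- 	while len(filter_list) < META_DECK_LEN:
-- 		set_of_pairs={}
-- 		for deck in set_of_decks:
-- 			valid=True
-- 			for card in filter_list:
-- 				if card not in deck:
-- 					valid=False
-- 			if valid:
-- 				for card in deck:
-- 					if card not in filter_list:
-- 						if card not in set_of_pairs:
-- 							set_of_pairs[card]=0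
-- 						set_of_pairs[card]+=1
-- 		max_card=""
-- 		max_seen=0
-- 		for card in set_of_pairs:
-- 			tmp_max=set_of_pairs[card]
-- 			if tmp_max>max_seen:
-- 				max_seen=tmp_max
-- 				max_card=card
-- 		filter_list.append(max_card)
-- 	return filter_list
-- ===== SOURCE B (Python) =====
-- def getHighestPairedCard(card_name, set_of_decks):
--     def extend(filter_list, valid):
--         if len(filter_list) >= 12:
--             return filter_list
--         stream = [c for d in valid for c in d if c not in filter_list]
--         best = ""
--         best_n = 0
--         for c in dict.fromkeys(stream):
--             n = stream.count(c)
--             if n > best_n: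
--                 best, best_n = c, n
--         return extend(filter_list + [best], [d for d in valid if best in d])
--     return extend([card_name], [d for d in set_of_decks if card_name in d])
-- ===== Notes on version B (the rewrite author's own statement) =====
-- stated objective: faster
-- what changed: B is a recursive decomposition that keeps an incrementally shrinking valid-deck list (filtered once per appended card), flattens it into one occurrence stream and picks the best card by dedup-then-count, instead of A's per-iteration re-validation of every deck against the whole filter list with an incrementally built counting dict.
import Mathlib
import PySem

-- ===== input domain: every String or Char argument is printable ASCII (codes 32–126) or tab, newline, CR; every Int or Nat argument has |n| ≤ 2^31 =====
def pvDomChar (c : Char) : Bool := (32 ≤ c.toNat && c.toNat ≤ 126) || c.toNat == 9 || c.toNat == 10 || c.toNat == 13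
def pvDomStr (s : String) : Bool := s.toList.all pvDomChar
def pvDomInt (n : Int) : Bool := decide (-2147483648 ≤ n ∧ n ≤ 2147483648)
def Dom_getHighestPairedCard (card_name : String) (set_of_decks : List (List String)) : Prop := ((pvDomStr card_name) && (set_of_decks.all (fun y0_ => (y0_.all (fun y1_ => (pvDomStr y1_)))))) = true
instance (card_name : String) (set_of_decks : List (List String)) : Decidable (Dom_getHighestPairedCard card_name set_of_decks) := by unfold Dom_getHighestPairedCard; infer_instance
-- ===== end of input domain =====

-- B recursively extends the list while shrinking a valid-deck list incrementally, picking each card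
-- by dedup-then-count over the flattened stream instead of A's counting dict (objective: alternative).

-- ===== PORT A =====
-- one body of A's while-loop: build set_of_pairs over ALL decks (with the validity re-check),
-- then the strict-greater max scan over the dict's keys ('' when the dict is empty)
def pvStepA (set_of_decks : List (List String)) (filter_list : List String) : String :=
  let sp : PySem.Dict String Int :=
    set_of_decks.foldl (fun sp deck =>
      let valid := filter_list.foldl (fun v card => if !(deck.contains card) then false else v) true
      if valid then
        deck.foldl (fun sp card =>
          if !(filter_list.contains card) then
            (if sp.contains card then sp else sp.insert card 0).modify card 0 (· + 1)
          else sp) sp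
      else sp) PySem.Dict.empty
  -- 'sp[card]' with card ∈ sp.keys: the key is present, so getD 0 is exact
  (sp.keys.foldl (fun (m : String × Int) card =>
      let tmp := sp.getD card 0
      if tmp > m.2 then (card, tmp) else m) ("", 0)).1

-- the while-loop: length grows by 1 each pass, so fuel 12 is enough from length 1
def pvLoopA (set_of_decks : List (List String)) : Nat → List String → List String
  | 0, fl => fl
  | fuel + 1, fl =>
      if fl.length < 12 then pvLoopA set_of_decks fuel (fl ++ [pvStepA set_of_decks fl]) else fl

def getHighestPairedCard (card_name : String) (set_of_decks : List (List String)) : List String :=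
  pvLoopA set_of_decks 12 [card_name]

-- ===== PORT B =====
-- Source B's recursive extend: flatten the valid decks into the occurrence stream (the comprehension),
-- scan dict.fromkeys(stream) (= PySem.List.dedup) taking each card's stream.count
def pvExtendB (fuel : Nat) (filter_list : List String) (valid : List (List String)) : List String :=
  match fuel with
  | 0 => filter_list
  | fuel + 1 =>
      if 12 ≤ filter_list.length then filter_list
      else
        let stream := valid.flatMap (fun d => d.filter (fun c => !(filter_list.contains c)))
        let best := ((PySem.List.dedup stream).foldl (fun (m : String × Int) c =>
            let n := PySem.List.count stream c
            if n > m.2 then (c, n) else m) ("", 0)).1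
        pvExtendB fuel (filter_list ++ [best]) (valid.filter (fun d => d.contains best))

def getHighestPairedCard_alt (card_name : String) (set_of_decks : List (List String)) : List String :=
  pvExtendB 12 [card_name] (set_of_decks.filter (fun d => d.contains card_name))

-- ===== PRECONDITION & SPEC =====
def Spec_getHighestPairedCard (card_name : String) (set_of_decks : List (List String)) (out : List String) : Prop := out = getHighestPairedCard_alt card_name set_of_decks
instance (card_name : String) (set_of_decks : List (List String)) (out : List String) : Decidable (Spec_getHighestPairedCard card_name set_of_decks out) := by unfold Spec_getHighestPairedCard; infer_instance

-- ===== CLAIM (what is proved, stated in full; the proofs are below) =====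
def Claim_equal_getHighestPairedCard : Prop := ∀ (card_name : String) (set_of_decks : List (List String)), Dom_getHighestPairedCard card_name set_of_decks → Spec_getHighestPairedCard card_name set_of_decks (getHighestPairedCard card_name set_of_decks)

-- ===== LEMMAS AND PROOFS =====

-- A's two-step 'set default 0, then += 1' is the counter insert
theorem pv_count_step (sp : PySem.Dict String Int) (c : String) :
    (if sp.contains c then sp else sp.insert c 0).modify c 0 (· + 1)
      = sp.insert c (sp.getD c 0 + 1) := by
  by_cases h : sp.contains c = true
  · simp [h, PySem.Dict.modify]
  · simp only [Bool.not_eq_true] at h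
    simp [h, PySem.Dict.modify, PySem.Dict.insert_insert_self,
      PySem.Dict.getD_insert_self, PySem.Dict.getD_of_not_contains sp 0 h]

-- A's hand-rolled validity flag is the 'all' test
theorem pv_valid_eq (fl deck : List String) :
    fl.foldl (fun v card => if !(deck.contains card) then false else v) true
      = fl.all (fun c => deck.contains c) := by
  rw [PySem.List.foldl_if_false_eq (fun card => !(deck.contains card)) fl true]
  simp [List.all_eq_not_any_not]

-- A's dict over all decks with re-validation IS the counter of B's flattened stream
theorem pv_sp_counter (fl : List String) (decks : List (List String)) :
    decks.foldl (fun sp deck =>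
        let valid := fl.foldl (fun v card => if !(deck.contains card) then false else v) true
        if valid then
          deck.foldl (fun sp card =>
            if !(fl.contains card) then
              (if sp.contains card then sp else sp.insert card 0).modify card 0 (· + 1)
            else sp) sp
        else sp) PySem.Dict.empty
      = PySem.Dict.counter
          ((decks.filter (fun d => fl.all (fun c => d.contains c))).flatMap
            (fun d => d.filter (fun c => !(fl.contains c)))) := by
  calc
    _ = decks.foldl (fun (sp : PySem.Dict String Int) deck =>
          if fl.all (fun c => deck.contains c) then
            (deck.filter (fun c => !(fl.contains c))).foldl
              (fun sp card => sp.insert card (sp.getD card 0 + 1)) sp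
          else sp) PySem.Dict.empty := by
          apply PySem.List.foldl_congr_mem
          intro sp deck _
          simp only [pv_valid_eq fl deck]
          by_cases hv : fl.all (fun c => deck.contains c) = true
          · simp only [hv, if_true]
            rw [← PySem.List.foldl_if_eq_foldl_filter]
            apply PySem.List.foldl_congr_mem
            intro sp c _
            by_cases hc : fl.contains c = true
            · simp only [hc, Bool.not_true, Bool.false_eq_true, if_false]
            · simp only [Bool.not_eq_true] at hc
              simp only [hc, Bool.not_false, if_true]
              exact pv_count_step sp c
          · simp only [Bool.not_eq_true] at hv
            simp only [hv, Bool.false_eq_true, if_false]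
    _ = ((decks.filter (fun d => fl.all (fun c => d.contains c))).map
          (fun d => d.filter (fun c => !(fl.contains c)))).foldl
            (fun (sp : PySem.Dict String Int) l =>
              l.foldl (fun sp card => sp.insert card (sp.getD card 0 + 1)) sp)
            PySem.Dict.empty := by
          rw [List.foldl_map, ← PySem.List.foldl_if_eq_foldl_filter]
    _ = _ := by
          rw [← List.foldl_flatten, ← List.flatMap_def,
            PySem.Dict.foldl_insert_getD_add_one_eq_counter]

-- one iteration body agrees: A's dict max-scan = B's dedup/count scan over the filtered decks' stream
theorem pv_step_eq (decks : List (List String)) (fl : List String) :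
    pvStepA decks fl
      = ((PySem.List.dedup ((decks.filter (fun d => fl.all (fun c => d.contains c))).flatMap
            (fun d => d.filter (fun c => !(fl.contains c))))).foldl
          (fun (m : String × Int) c =>
            let n := PySem.List.count
              ((decks.filter (fun d => fl.all (fun c => d.contains c))).flatMap
                (fun d => d.filter (fun c => !(fl.contains c)))) c
            if n > m.2 then (c, n) else m) ("", 0)).1 := by
  simp only [pvStepA, pv_sp_counter fl decks, PySem.Dict.keys_counter,
    PySem.List.dedup_eq_ofList, PySem.Dict.getD_counter, PySem.List.count_eq]

-- the incremental valid-deck filter matches filtering by the extended list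
theorem pv_filter_snoc (decks : List (List String)) (fl : List String) (m : String) :
    (decks.filter (fun d => fl.all (fun c => d.contains c))).filter (fun d => d.contains m)
      = decks.filter (fun d => (fl ++ [m]).all (fun c => d.contains c)) := by
  rw [List.filter_filter]
  apply List.filter_congr
  intro d _
  simp [List.all_append, Bool.and_comm]

theorem pv_loop_eq (decks : List (List String)) (fuel : Nat) (fl : List String) :
    pvLoopA decks fuel fl
      = pvExtendB fuel fl (decks.filter (fun d => fl.all (fun c => d.contains c))) := by
  induction fuel generalizing fl with
  | zero => rfl
  | succ n ih =>
      unfold pvLoopA pvExtendB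
      by_cases h : fl.length < 12
      · have h' : ¬ 12 ≤ fl.length := by omega
        simp only [h, if_true, h', if_false]
        rw [pv_step_eq decks fl, ih, pv_filter_snoc]
      · have h' : 12 ≤ fl.length := by omega
        simp [h, h']

-- ===== VERDICT (by name: the statement is the Claim_ definition above) =====
theorem getHighestPairedCard_spec : Claim_equal_getHighestPairedCard := by
  intro card_name set_of_decks _
  show getHighestPairedCard card_name set_of_decks = getHighestPairedCard_alt card_name set_of_decks
  unfold getHighestPairedCard getHighestPairedCard_alt
  rw [pv_loop_eq]
  congr 1
  apply List.filter_congr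
  intro d _
  simp
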